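-- pv_equiv track=rewrite | github.com/MrBrantCode/unitest_baseline | mut_generate/mist_train_taco/taco_11929/solution.py | solve_mystery
-- ===== SOURCE A (Python) =====
-- def solve_mystery(test_cases):
--     results = []
--     for s in test_cases:
--         rev = s[::-1]
--         if s == rev:
--             ch = s[len(s) // 2]
--             results.append(ord(ch))
--         else:
--             results.append(-1)
--     return results
-- ===== SOURCE B (Python) =====
-- def _mid_or_minus1(s):
--     # two-pointer palindrome scan
--     i, j = 0, len(s) - 1
--     while i < j:
--         if s[i] != s[j]:
--             return -1
--         i += 1
--         j -= 1
--     return ord(s[len(s) // 2])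
--
-- def solve_mystery(test_cases):
--     return [_mid_or_minus1(s) for s in test_cases]
-- ===== Notes on version B (the rewrite author's own statement) =====
-- stated objective: alternative
-- what changed: Replaces the slice-reversal-and-compare palindrome test with an in-place two-pointer scan that stops at the first mismatch, and builds the result with a per-string helper in a comprehension instead of an append loop.
import Mathlib
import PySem

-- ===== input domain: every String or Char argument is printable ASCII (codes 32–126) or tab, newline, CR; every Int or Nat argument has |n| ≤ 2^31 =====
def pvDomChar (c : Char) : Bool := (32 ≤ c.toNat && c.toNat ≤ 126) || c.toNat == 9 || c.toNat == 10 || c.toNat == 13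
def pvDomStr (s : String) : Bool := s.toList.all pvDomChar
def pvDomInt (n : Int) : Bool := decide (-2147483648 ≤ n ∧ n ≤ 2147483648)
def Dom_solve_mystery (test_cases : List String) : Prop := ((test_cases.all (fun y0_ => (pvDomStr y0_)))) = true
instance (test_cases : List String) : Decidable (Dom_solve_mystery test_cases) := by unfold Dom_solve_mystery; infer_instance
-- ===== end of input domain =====

-- B replaces A's slice-reversal palindrome test by a two-pointer scan; same results, 'alternative' objective.
-- ===== PORT A =====
-- literal port of A: reverse the string, compare, then index the middle character
def solve_mystery (test_cases : List String) : List Int :=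
  test_cases.foldl (fun results s =>
    let cs := s.toList
    let rev := cs.reverse           -- s[::-1]
    if cs = rev then
      match cs[(cs.length / 2)]? with   -- s[len(s) // 2]; none = IndexError, excluded by Pre_
      | some ch => results ++ [(ch.toNat : Int)]
      | none => results ++ [0]
    else results ++ [-1]) []

-- ===== PORT B =====
-- two-pointer scan of Source B: while i < j compare s[i], s[j], move inward
def pvPal2 (cs : List Char) (i j : Nat) : Bool :=
  if i < j then
    if cs[i]? = cs[j]? then pvPal2 cs (i + 1) (j - 1) else false
  else true
termination_by j - i
decreasing_by omega

def pvMidOrMinus1 (s : String) : Int :=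
  let cs := s.toList
  if pvPal2 cs 0 (cs.length - 1) then
    match cs[(cs.length / 2)]? with     -- ord(s[len(s) // 2]); none = IndexError, excluded by Pre_
    | some ch => (ch.toNat : Int)
    | none => 0
  else -1

def solve_mystery_alt (test_cases : List String) : List Int :=
  test_cases.map pvMidOrMinus1

-- ===== PRECONDITION & SPEC =====
-- Pre_ excludes exactly the inputs containing the empty string, on which both A and B raise IndexError ('' is a palindrome, s[0] fails).
def Pre_solve_mystery (test_cases : List String) : Prop := ∀ s ∈ test_cases, s ≠ ""
instance (test_cases : List String) : Decidable (Pre_solve_mystery test_cases) := by unfold Pre_solve_mystery; infer_instance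
def pvWitness_solve_mystery : List String := ["aba", "ab", "x"]
def Spec_solve_mystery (test_cases : List String) (out : List Int) : Prop := out = solve_mystery_alt test_cases
instance (test_cases : List String) (out : List Int) : Decidable (Spec_solve_mystery test_cases out) := by unfold Spec_solve_mystery; infer_instance

-- ===== CLAIM (what is proved, stated in full; the proofs are below) =====
def Claim_equal_solve_mystery : Prop := ∀ (test_cases : List String), Dom_solve_mystery test_cases → Pre_solve_mystery test_cases → Spec_solve_mystery test_cases (solve_mystery test_cases)

-- ===== LEMMAS AND PROOFS =====

theorem pvPal2_iff (cs : List Char) (i j : Nat) :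
    pvPal2 cs i j = true ↔ ∀ k, i ≤ k → k ≤ j → cs[k]? = cs[i + j - k]? := by
  fun_induction pvPal2 cs i j with
  | case1 i j hij heq ih =>
    rw [ih]
    constructor
    · intro h k hk1 hk2
      rcases Nat.eq_or_lt_of_le hk1 with rfl | hk1'
      · simpa using heq
      · rcases Nat.eq_or_lt_of_le hk2 with rfl | hk2'
        · have : i + k - k = i := by omega
          rw [this]; exact heq.symm
        · have h1 : i + 1 ≤ k := hk1'
          have h2 : k ≤ j - 1 := by omega
          have := h k h1 h2
          have e : i + 1 + (j - 1) - k = i + j - k := by omega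
          rwa [e] at this
    · intro h k hk1 hk2
      have := h k (by omega) (by omega)
      have e : i + j - k = i + 1 + (j - 1) - k := by omega
      rwa [e] at this
  | case2 i j hij heq =>
    constructor
    · intro h; exact (Bool.false_ne_true h).elim
    · intro h
      have := h i (le_refl i) (le_of_lt hij)
      have e : i + j - i = j := by omega
      rw [e] at this
      exact absurd this heq
  | case3 i j hij =>
    constructor
    · intro _ k hk1 hk2
      have hki : k = i ∧ i = j := by omega
      rcases hki with ⟨rfl, rfl⟩
      have e : k + k - k = k := by omega
      rw [e]
    · intro _; rfl

theorem rev_eq_iff (cs : List Char) :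
    (cs.reverse = cs) ↔ ∀ k, k ≤ cs.length - 1 → cs[k]? = cs[0 + (cs.length - 1) - k]? := by
  rcases cs with _ | ⟨c, cs'⟩
  · simp
  · set l := (c :: cs') with hl
    have hlen : 0 < l.length := by simp [hl]
    rw [List.ext_getElem?_iff]
    constructor
    · intro h k hk
      have hk' : k < l.length := by omega
      have := h k
      rw [List.getElem?_reverse hk'] at this
      have e : 0 + (l.length - 1) - k = l.length - 1 - k := by omega
      rw [e, ← this]
    · intro h n
      by_cases hn : n < l.length
      · rw [List.getElem?_reverse hn]
        have := h (l.length - 1 - n) (by omega)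
        have e1 : 0 + (l.length - 1) - (l.length - 1 - n) = n := by omega
        rw [e1] at this
        exact this
      · rw [List.getElem?_eq_none_iff.mpr (by rw [List.length_reverse]; omega),
            List.getElem?_eq_none_iff.mpr (by omega)]

theorem pal2_eq_rev (cs : List Char) :
    pvPal2 cs 0 (cs.length - 1) = true ↔ cs.reverse = cs := by
  rw [pvPal2_iff, rev_eq_iff]
  constructor
  · intro h k hk; exact h k (Nat.zero_le k) hk
  · intro h k _ hk; exact h k hk

theorem per_string (s : String) :
    (let cs := s.toList
     if cs = cs.reverse then
       match cs[(cs.length / 2)]? with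
       | some ch => ((ch.toNat : Int))
       | none => (0 : Int)
     else -1) = pvMidOrMinus1 s := by
  unfold pvMidOrMinus1
  simp only []
  by_cases h : s.toList.reverse = s.toList
  · rw [if_pos h.symm, if_pos ((pal2_eq_rev s.toList).mpr h)]
  · rw [if_neg (fun e => h e.symm), if_neg (by rw [pal2_eq_rev]; exact h)]

theorem foldl_gen (f : String → Int) (tcs : List String) (acc : List Int) :
    tcs.foldl (fun r s => r ++ [f s]) acc = acc ++ tcs.map f := by
  induction tcs generalizing acc with
  | nil => simp
  | cons s rest ih => simp [List.foldl_cons, ih, List.append_assoc]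

-- ===== VERDICT (by name: the statement is the Claim_ definition above) =====
theorem solve_mystery_spec : Claim_equal_solve_mystery := by
  intro tcs _ _
  unfold Spec_solve_mystery solve_mystery solve_mystery_alt
  have hbody : (fun (results : List Int) (s : String) =>
      let cs := s.toList
      let rev := cs.reverse
      if cs = rev then
        match cs[(cs.length / 2)]? with
        | some ch => results ++ [(ch.toNat : Int)]
        | none => results ++ [0]
      else results ++ [-1])
      = fun results s => results ++ [pvMidOrMinus1 s] := by
    funext results s
    rw [← per_string s]
    simp only []
    by_cases h : s.toList = s.toList.reverse
    · rw [if_pos h, if_pos h]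
      cases s.toList[(s.toList.length / 2)]? <;> rfl
    · rw [if_neg h, if_neg h]
  rw [hbody, foldl_gen, List.nil_append]
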